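-- pv_equiv track=rewrite | github.com/ANDRIANANTENAINA/djangoRO | projet/algos.py | reachMax
-- ===== SOURCE A (Python) =====
-- def reachMax(liste):
--     i = 0
--     val = None
--     while i < len(liste):
--         if liste[i] is not None:
--             if val is None:
--                 val = liste[i]
--             elif val < liste[i]:
--                 val = liste[i]
--         i = i + 1
--     return val
-- ===== SOURCE B (Python) =====
-- def reachMax(liste):
--     if not liste:
--         return None
--     if len(liste) == 1:
--         return liste[0]
--     mid = len(liste) // 2
--     l = reachMax(liste[:mid])
--     r = reachMax(liste[mid:])
--     if l is None:
--         return r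
--     if r is None:
--         return l
--     return l if l >= r else r
-- ===== Notes on version B (the rewrite author's own statement) =====
-- stated objective: alternative
-- what changed: Replaces A's single-pass index walk with a None-tracking running maximum by a divide-and-conquer recursion: split the list in half, recursively take the max of each half (None for empty/all-None), and combine the two partial results.
import Mathlib
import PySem

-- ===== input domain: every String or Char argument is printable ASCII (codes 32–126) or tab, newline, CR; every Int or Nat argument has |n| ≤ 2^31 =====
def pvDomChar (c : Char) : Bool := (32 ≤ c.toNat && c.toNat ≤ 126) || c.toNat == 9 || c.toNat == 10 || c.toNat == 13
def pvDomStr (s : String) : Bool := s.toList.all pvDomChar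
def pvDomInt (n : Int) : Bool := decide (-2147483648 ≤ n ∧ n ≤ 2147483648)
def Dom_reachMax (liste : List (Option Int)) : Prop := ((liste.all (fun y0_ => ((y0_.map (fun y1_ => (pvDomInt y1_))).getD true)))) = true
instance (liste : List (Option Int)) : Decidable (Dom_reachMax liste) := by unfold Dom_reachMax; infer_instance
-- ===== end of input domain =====

-- B replaces A's index walk with a divide-and-conquer recursion (halve, recurse, combine); alternative structure, same values.
-- ===== PORT A =====
def reachMaxGo (liste : List (Option Int)) (i : Nat) (val : Option Int) : Option Int :=
  if h : i < liste.length then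
    reachMaxGo liste (i + 1)
      (match liste[i] with
       | none => val
       | some v =>
         match val with
         | none => some v
         | some w => if w < v then some v else val)
  else val
termination_by liste.length - i

def reachMax (liste : List (Option Int)) : Option Int :=
  reachMaxGo liste 0 none

-- ===== PORT B =====
-- Python's liste[:mid] / liste[mid:] with 0 ≤ mid ≤ len are exactly List.take mid / List.drop mid,
-- and len(liste)//2 on a nonnegative length is Nat division.
def reachMax_alt (liste : List (Option Int)) : Option Int :=
  match liste with
  | [] => none
  | [x] => x
  | a :: b :: t =>
    let mid := (a :: b :: t).length / 2
    let l := reachMax_alt ((a :: b :: t).take mid)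
    let r := reachMax_alt ((a :: b :: t).drop mid)
    match l with
    | none => r
    | some lv =>
      match r with
      | none => l
      | some rv => if lv ≥ rv then l else r
termination_by liste.length
decreasing_by
  · simp [List.length_take]; omega
  · simp; omega

-- ===== PRECONDITION & SPEC =====
def Spec_reachMax (liste : List (Option Int)) (out : Option Int) : Prop := out = reachMax_alt liste
instance (liste : List (Option Int)) (out : Option Int) : Decidable (Spec_reachMax liste out) := by unfold Spec_reachMax; infer_instance

-- ===== CLAIM (what is proved, stated in full; the proofs are below) =====
def Claim_equal_reachMax : Prop := ∀ (liste : List (Option Int)), Dom_reachMax liste → Spec_reachMax liste (reachMax liste)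

-- ===== LEMMAS AND PROOFS =====

-- A's loop-body update, as a function of the accumulator and one element.
def pvUpd (val : Option Int) (x : Option Int) : Option Int :=
  match x with
  | none => val
  | some v =>
    match val with
    | none => some v
    | some w => if w < v then some v else val

theorem reachMaxGo_eq_foldl (liste : List (Option Int)) (i : Nat) (val : Option Int) :
    reachMaxGo liste i val = (liste.drop i).foldl pvUpd val := by
  fun_induction reachMaxGo liste i val with
  | case1 i val h ih =>
    rw [List.drop_eq_getElem_cons h, List.foldl_cons]
    exact ih
  | case2 i val h =>
    rw [List.drop_of_length_le (by omega), List.foldl_nil]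

theorem pvUpd_some (w v : Int) : pvUpd (some w) (some v) = some (max w v) := by
  simp only [pvUpd]
  rcases lt_or_ge w v with h | h
  · rw [if_pos h, max_eq_right h.le]
  · rw [if_neg (not_lt.mpr h), max_eq_left h]

theorem foldl_pvUpd_some (l : List (Option Int)) (w : Int) :
    l.foldl pvUpd (some w) = some ((l.filterMap (fun x => x)).foldl max w) := by
  induction l generalizing w with
  | nil => rfl
  | cons x t ih =>
    cases x with
    | none => simpa [pvUpd] using ih w
    | some v => simp [pvUpd_some, ih]

-- B's combine step, and a characterisation of A's fold as "max of the non-None elements".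
def pvComb (l r : Option Int) : Option Int :=
  match l with
  | none => r
  | some lv =>
    match r with
    | none => l
    | some rv => if lv ≥ rv then l else r

def pvM (l : List (Option Int)) : Option Int :=
  match l.filterMap (fun x => x) with
  | [] => none
  | x :: t => some (t.foldl max x)

theorem foldl_pvUpd_none (l : List (Option Int)) : l.foldl pvUpd none = pvM l := by
  induction l with
  | nil => rfl
  | cons x t ih =>
    cases x with
    | none => simpa [pvUpd, pvM] using ih
    | some v => simp [pvUpd, pvM, foldl_pvUpd_some]

theorem pvComb_eq_max (w y : Int) : pvComb (some w) (some y) = some (max w y) := by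
  simp only [pvComb]
  rcases le_or_gt y w with h | h
  · rw [if_pos h, max_eq_left h]
  · rw [if_neg (not_le.mpr h), max_eq_right h.le]

theorem foldl_max_pull (l : List Int) (a b : Int) :
    l.foldl max (max a b) = max a (l.foldl max b) := by
  induction l generalizing b with
  | nil => rfl
  | cons c s ih => simp only [List.foldl_cons]; rw [max_assoc, ih]

theorem pvM_append (a b : List (Option Int)) :
    pvM (a ++ b) = pvComb (pvM a) (pvM b) := by
  cases ha : a.filterMap (fun x => x) with
  | nil => simp [pvM, List.filterMap_append, ha, pvComb]
  | cons x t =>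
    cases hb : b.filterMap (fun x => x) with
    | nil => simp [pvM, List.filterMap_append, ha, hb, pvComb]
    | cons y s =>
      simp only [pvM, List.filterMap_append, ha, hb, List.cons_append, pvComb_eq_max]
      rw [List.foldl_append, List.foldl_cons, foldl_max_pull]

theorem reachMax_alt_eq_foldl (liste : List (Option Int)) :
    reachMax_alt liste = liste.foldl pvUpd none := by
  generalize hn : liste.length = n
  induction n using Nat.strong_induction_on generalizing liste with
  | _ n ih =>
    match liste, hn with
    | [], _ => rw [reachMax_alt]; rfl
    | [x], _ => cases x <;> (rw [reachMax_alt]; rfl)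
    | a :: b :: t, hn =>
      have hl := ih ((a :: b :: t).length / 2)
        (by subst hn; simp; omega)
        ((a :: b :: t).take ((a :: b :: t).length / 2))
        (by simp [List.length_take]; omega)
      have hr := ih ((a :: b :: t).length - (a :: b :: t).length / 2)
        (by subst hn; simp; omega)
        ((a :: b :: t).drop ((a :: b :: t).length / 2))
        (by simp)
      rw [reachMax_alt]
      show pvComb (reachMax_alt ((a :: b :: t).take ((a :: b :: t).length / 2)))
          (reachMax_alt ((a :: b :: t).drop ((a :: b :: t).length / 2))) = _
      rw [hl, hr, foldl_pvUpd_none, foldl_pvUpd_none, ← pvM_append,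
        List.take_append_drop, ← foldl_pvUpd_none]

-- ===== VERDICT =====
theorem reachMax_spec : Claim_equal_reachMax := by
  intro liste _
  unfold Spec_reachMax reachMax
  rw [reachMaxGo_eq_foldl, List.drop_zero, reachMax_alt_eq_foldl]
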